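-- pv_equiv track=rewrite | github.com/WolvesWithSword/TATIA | DataInitialiser.py | getGeneralPolarity
-- ===== SOURCE A (Python) =====
-- POLARITY_DIC = {"negative" : 0, "positive":1, "neutral":2, "mixed":3}
--
-- def getGeneralPolarity(polarities):
--     currentPol = "neutral"#For case where no opinions is present.
--
--     for polarity in polarities:
--         if(currentPol == "neutral"): #Positive or negative win on neutral
--             currentPol = polarity
--
--         #negative and positive opinion create a mixed opinion
--         if((currentPol == "positive" and polarity == "negative") or (currentPol == "negative" and polarity == "positive")):
--             currentPol = "mixed"
--
--     return POLARITY_DIC[currentPol]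
-- ===== SOURCE B (Python) =====
-- POLARITY_DIC = {"negative": 0, "positive": 1, "neutral": 2, "mixed": 3}
--
-- def getGeneralPolarity(polarities):
--     pols = list(polarities)
--     base = next((p for p in pols if p != "neutral"), "neutral")
--     if base == "positive" and "negative" in pols:
--         base = "mixed"
--     elif base == "negative" and "positive" in pols:
--         base = "mixed"
--     return POLARITY_DIC[base]
-- ===== Notes on version B (the rewrite author's own statement) =====
-- stated objective: simpler
-- what changed: Replaces the stateful fold over the running polarity by a direct characterisation: take the first non-neutral element as base and promote it to mixed when the opposite polarity occurs anywhere in the list.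
import Mathlib
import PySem

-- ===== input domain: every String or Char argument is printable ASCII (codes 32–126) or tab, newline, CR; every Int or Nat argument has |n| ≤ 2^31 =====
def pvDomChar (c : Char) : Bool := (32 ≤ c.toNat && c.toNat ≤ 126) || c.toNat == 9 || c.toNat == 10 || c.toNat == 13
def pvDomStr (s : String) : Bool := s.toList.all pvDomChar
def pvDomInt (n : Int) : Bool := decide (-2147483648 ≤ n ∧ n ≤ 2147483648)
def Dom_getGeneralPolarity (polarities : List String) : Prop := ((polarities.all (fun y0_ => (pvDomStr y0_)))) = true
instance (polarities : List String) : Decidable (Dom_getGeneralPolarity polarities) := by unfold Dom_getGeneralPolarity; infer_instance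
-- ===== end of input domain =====

-- B re-implements A by a direct characterisation (first non-neutral element, promoted to
-- "mixed" when the opposite polarity occurs) instead of A's stateful fold; same O(n) cost.

-- POLARITY_DIC = {"negative": 0, "positive": 1, "neutral": 2, "mixed": 3}
def POLARITY_DIC : PySem.Dict String Int :=
  PySem.Dict.ofList [("negative", 0), ("positive", 1), ("neutral", 2), ("mixed", 3)]

-- ===== PORT A =====
-- loop body of A: the neutral-overwrite step followed by the mixed-creation step
def polStepA (cur p : String) : String :=
  let cur1 := if cur = "neutral" then p else cur
  if (cur1 = "positive" ∧ p = "negative") ∨ (cur1 = "negative" ∧ p = "positive")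
  then "mixed" else cur1

-- A raises KeyError exactly when the final key is missing; Pre_ excludes that, so getD 0 is never hit inside Pre_
def getGeneralPolarity (polarities : List String) : Int :=
  (POLARITY_DIC.get? (polarities.foldl polStepA "neutral")).getD 0

-- ===== PORT B =====
def getGeneralPolarity_alt (polarities : List String) : Int :=
  let base := (polarities.dropWhile (· = "neutral")).headD "neutral"
  let base :=
    if base = "positive" ∧ "negative" ∈ polarities then "mixed"
    else if base = "negative" ∧ "positive" ∈ polarities then "mixed"
    else base
  (POLARITY_DIC.get? base).getD 0

-- ===== PRECONDITION & SPEC =====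
-- Pre_ excludes exactly the inputs on which A raises KeyError: those whose first
-- non-"neutral" element is not a key of POLARITY_DIC (B raises KeyError there too).
def Pre_getGeneralPolarity (polarities : List String) : Prop :=
  let x := (polarities.dropWhile (· = "neutral")).headD "neutral"
  x = "neutral" ∨ x = "negative" ∨ x = "positive" ∨ x = "mixed"
instance (polarities : List String) : Decidable (Pre_getGeneralPolarity polarities) := by
  unfold Pre_getGeneralPolarity; infer_instance

def pvWitness_getGeneralPolarity : List String := ["neutral", "positive", "negative"]

def Spec_getGeneralPolarity (polarities : List String) (out : Int) : Prop := out = getGeneralPolarity_alt polarities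
instance (polarities : List String) (out : Int) : Decidable (Spec_getGeneralPolarity polarities out) := by unfold Spec_getGeneralPolarity; infer_instance

-- ===== CLAIM (what is proved, stated in full; the proofs are below) =====
def Claim_equal_getGeneralPolarity : Prop := ∀ (polarities : List String), Dom_getGeneralPolarity polarities → Pre_getGeneralPolarity polarities → Spec_getGeneralPolarity polarities (getGeneralPolarity polarities)

-- ===== LEMMAS AND PROOFS =====

-- once the running polarity is anything but "neutral", "positive" or "negative", it never changes
theorem foldl_polStepA_frozen (cur : String) (hn : cur ≠ "neutral")
    (hp : cur ≠ "positive") (hg : cur ≠ "negative") (xs : List String) :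
    xs.foldl polStepA cur = cur := by
  induction xs with
  | nil => rfl
  | cons x t ih =>
    have : polStepA cur x = cur := by
      simp [polStepA, hn, hp, hg]
    simpa [List.foldl, this] using ih

theorem foldl_polStepA_pos (xs : List String) :
    xs.foldl polStepA "positive" = if "negative" ∈ xs then "mixed" else "positive" := by
  induction xs with
  | nil => rfl
  | cons x t ih =>
    by_cases hx : x = "negative"
    · subst hx
      have h1 : polStepA "positive" "negative" = "mixed" := by decide
      have h2 : t.foldl polStepA "mixed" = "mixed" :=
        foldl_polStepA_frozen "mixed" (by decide) (by decide) (by decide) t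
      simp [List.foldl, h1, h2]
    · have h1 : polStepA "positive" x = "positive" := by
        simp [polStepA, hx]
      simp [List.foldl, h1, ih, List.mem_cons, Ne.symm hx]

theorem foldl_polStepA_neg (xs : List String) :
    xs.foldl polStepA "negative" = if "positive" ∈ xs then "mixed" else "negative" := by
  induction xs with
  | nil => rfl
  | cons x t ih =>
    by_cases hx : x = "positive"
    · subst hx
      have h1 : polStepA "negative" "positive" = "mixed" := by decide
      have h2 : t.foldl polStepA "mixed" = "mixed" :=
        foldl_polStepA_frozen "mixed" (by decide) (by decide) (by decide) t
      simp [List.foldl, h1, h2]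
    · have h1 : polStepA "negative" x = "negative" := by
        simp [polStepA, hx]
      simp [List.foldl, h1, ih, List.mem_cons, Ne.symm hx]

-- characterisation of A's fold as B's base-then-opposite computation
theorem foldl_polStepA_eq (xs : List String) :
    xs.foldl polStepA "neutral" =
      (let base := (xs.dropWhile (· = "neutral")).headD "neutral"
       if base = "positive" ∧ "negative" ∈ xs then "mixed"
       else if base = "negative" ∧ "positive" ∈ xs then "mixed"
       else base) := by
  induction xs with
  | nil => rfl
  | cons x t ih =>
    by_cases hx : x = "neutral"
    · subst hx
      have h1 : polStepA "neutral" "neutral" = "neutral" := by decide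
      simp only [List.foldl, h1, ih, List.dropWhile_cons, decide_true, List.mem_cons]
      simp
    · have hdrop : (x :: t).dropWhile (· = "neutral") = x :: t := by
        simp [hx]
      by_cases hp : x = "positive"
      · subst hp
        have h1 : polStepA "neutral" "positive" = "positive" := by decide
        simp [List.foldl, h1, foldl_polStepA_pos, hdrop, List.mem_cons]
      · by_cases hg : x = "negative"
        · subst hg
          have h1 : polStepA "neutral" "negative" = "negative" := by decide
          simp [List.foldl, h1, foldl_polStepA_neg, hdrop, List.mem_cons]
        · have h1 : polStepA "neutral" x = x := by
            simp [polStepA, hp, hg]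
          have h2 : t.foldl polStepA x = x := foldl_polStepA_frozen x hx hp hg t
          simp [List.foldl, h1, h2, hdrop, hp, hg]

-- ===== VERDICT (by name: the statement is the Claim_ definition above) =====
theorem getGeneralPolarity_spec : Claim_equal_getGeneralPolarity := by
  intro polarities _ _
  unfold Spec_getGeneralPolarity getGeneralPolarity getGeneralPolarity_alt
  rw [foldl_polStepA_eq]
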